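-- pv_equiv track=rewrite | github.com/fedemonte95/genetics | clase.py | cruces
-- ===== SOURCE A (Python) =====
-- def cruces(padreA, padreB, cantPuntos ):
--     punto = 0
--     hijoA=''
--     hijoB=''
--     divisiones = len(padreA)// (cantPuntos + 1)
--     flag = 0
--     while(divisiones<=len(padreA)):
--         if(flag == 0):
--             hijoA += padreA[punto: punto + divisiones]
--             hijoB += padreB[punto: punto + divisiones]
--             flag = 1
--         else:
--             hijoA += padreB[punto:divisiones]
--             hijoB += padreA[punto:divisiones]
--             flag = 0
--         punto = divisiones
--         divisiones = divisiones + punto + ((len(padreA)-divisiones)%(len(padreA)// (cantPuntos + 1)))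
--     return(hijoA,hijoB)
-- ===== SOURCE B (Python) =====
-- def cruces(padreA, padreB, cantPuntos):
--     # Flagless recursive decomposition: one helper builds ONE child by
--     # consuming two crossover segments per call (the 'own' slice and the
--     # 'other' slice), so A's alternating flag disappears; the two children
--     # are obtained by calling the helper twice with the parents swapped.
--     n = len(padreA)
--     base = n // (cantPuntos + 1)
--
--     def child(own, other, p, d):
--         if d > n:
--             return ''
--         piece = own[p:p + d]
--         d2 = 2 * d + (n - d) % base
--         if d2 > n:
--             return piece
--         return piece + other[d:d2] + child(own, other, d2, 2 * d2 + (n - d2) % base)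
--
--     return (child(padreA, padreB, 0, base), child(padreB, padreA, 0, base))
-- ===== Notes on version B (the rewrite author's own statement) =====
-- stated objective: alternative
-- what changed: A's single while-loop with a flag and two simultaneous += accumulators is replaced by a flagless recursive helper that builds ONE child at a time, consuming two crossover segments per call and joining recursive results; the two children come from two calls with the parents swapped.
import Mathlib
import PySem

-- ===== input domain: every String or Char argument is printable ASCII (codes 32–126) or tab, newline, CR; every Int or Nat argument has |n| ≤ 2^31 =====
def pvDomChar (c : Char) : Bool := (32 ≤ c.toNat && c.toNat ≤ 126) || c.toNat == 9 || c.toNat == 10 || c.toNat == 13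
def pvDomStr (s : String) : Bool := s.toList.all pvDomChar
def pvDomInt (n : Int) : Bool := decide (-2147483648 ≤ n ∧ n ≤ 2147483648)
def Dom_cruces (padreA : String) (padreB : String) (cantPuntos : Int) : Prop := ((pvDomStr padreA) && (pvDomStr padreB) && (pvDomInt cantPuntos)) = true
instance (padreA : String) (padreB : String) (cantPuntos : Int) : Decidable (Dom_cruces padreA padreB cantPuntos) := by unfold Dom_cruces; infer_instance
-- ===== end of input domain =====

-- B replaces A's flag-driven while-loop with two accumulators by a flagless recursive
-- helper building one child at a time (two crossover segments per call), called twice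
-- with the parents swapped (objective: alternative decomposition; same return values).

-- ===== PORT A =====
-- A's while-loop; fuel bounds the iterations (inside Pre_ the boundary at least
-- doubles each iteration, so 2*(len+1) fuel is never exhausted; outside Pre_ Python
-- raises or loops forever and nothing is claimed).
def crucesLoop (a b : List Char) (d0 : Int) (punto div : Int) (flag : Bool)
    (hA hB : List Char) : Nat → List Char × List Char
  | 0 => (hA, hB)
  | fuel+1 =>
    if div ≤ (a.length : Int) then
      let st :=
        if flag = false then
          (hA ++ PySem.List.slice a (some punto) (some (punto + div)),
           hB ++ PySem.List.slice b (some punto) (some (punto + div)), true)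
        else
          (hA ++ PySem.List.slice b (some punto) (some div),
           hB ++ PySem.List.slice a (some punto) (some div), false)
      let punto' := div
      let div' := div + punto' + PySem.Int.mod ((a.length : Int) - div) d0
      crucesLoop a b d0 punto' div' st.2.2 st.1 st.2.1 fuel
    else (hA, hB)

def cruces (padreA : String) (padreB : String) (cantPuntos : Int) : String × String :=
  let a := padreA.toList
  let b := padreB.toList
  let d0 := PySem.Int.floordiv (a.length : Int) (cantPuntos + 1)
  let r := crucesLoop a b d0 0 d0 false [] [] (2 * (a.length + 1))
  (String.ofList r.1, String.ofList r.2)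

-- ===== PORT B =====
-- Source B's recursive `child`: builds one child, two segments per call, no flag.
-- Fuel: each call at least quadruples d (d ≥ 1 inside Pre_), so len+1 suffices there.
def crucesChild (own other : List Char) (n d0 : Int) (p d : Int) : Nat → List Char
  | 0 => []
  | fuel+1 =>
    if d ≤ n then
      let piece := PySem.List.slice own (some p) (some (p + d))
      let d2 := 2 * d + PySem.Int.mod (n - d) d0
      if d2 ≤ n then
        piece ++ PySem.List.slice other (some d) (some d2) ++
          crucesChild own other n d0 d2 (2 * d2 + PySem.Int.mod (n - d2) d0) fuel
      else piece
    else []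

def cruces_alt (padreA : String) (padreB : String) (cantPuntos : Int) : String × String :=
  let a := padreA.toList
  let b := padreB.toList
  let n : Int := a.length
  let d0 := PySem.Int.floordiv n (cantPuntos + 1)
  (String.ofList (crucesChild a b n d0 0 d0 (a.length + 1)),
   String.ofList (crucesChild b a n d0 0 d0 (a.length + 1)))

-- ===== PRECONDITION & SPEC =====
-- Pre_ = exactly the inputs on which Python A returns: cantPuntos = -1 raises
-- ZeroDivisionError at once; cantPuntos ≥ 0 with len(padreA) < cantPuntos+1 makes the
-- in-loop modulus zero (ZeroDivisionError); cantPuntos ≤ -2 makes the boundary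
-- decrease forever (the loop never terminates).
def Pre_cruces (padreA : String) (padreB : String) (cantPuntos : Int) : Prop :=
  0 ≤ cantPuntos ∧ cantPuntos + 1 ≤ (padreA.toList.length : Int)
instance (padreA : String) (padreB : String) (cantPuntos : Int) : Decidable (Pre_cruces padreA padreB cantPuntos) := by unfold Pre_cruces; infer_instance

def pvWitness_cruces : String × String × Int := ("abcdefgh", "ABCDEFGH", 2)

def Spec_cruces (padreA : String) (padreB : String) (cantPuntos : Int) (out : String × String) : Prop := out = cruces_alt padreA padreB cantPuntos
instance (padreA : String) (padreB : String) (cantPuntos : Int) (out : String × String) : Decidable (Spec_cruces padreA padreB cantPuntos out) := by unfold Spec_cruces; infer_instance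

-- ===== CLAIM =====
def Claim_equal_cruces : Prop := ∀ (padreA : String) (padreB : String) (cantPuntos : Int), Dom_cruces padreA padreB cantPuntos → Pre_cruces padreA padreB cantPuntos → Spec_cruces padreA padreB cantPuntos (cruces padreA padreB cantPuntos)

-- ===== LEMMAS AND PROOFS =====

-- Correspondence: A's loop, run with 2·f fuel from flag 0, equals the accumulators
-- followed by B's one-child builder with f fuel — one child-call = two loop iterations.
theorem crucesLoop_eq_child (a b : List Char) (d0 : Int) :
    ∀ (f : Nat) (p d : Int) (hA hB : List Char),
    crucesLoop a b d0 p d false hA hB (2 * f) =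
      (hA ++ crucesChild a b (a.length : Int) d0 p d f,
       hB ++ crucesChild b a (a.length : Int) d0 p d f) := by
  intro f
  induction f with
  | zero => intro p d hA hB; simp [crucesLoop, crucesChild]
  | succ f ih =>
    intro p d hA hB
    have h2 : 2 * (f + 1) = (2 * f + 1) + 1 := by ring
    rw [h2]
    by_cases hd : d ≤ (a.length : Int)
    · have he : 2 * d + PySem.Int.mod ((a.length : Int) - d) d0
          = d + d + PySem.Int.mod ((a.length : Int) - d) d0 := by ring
      simp only [crucesLoop, crucesChild, if_pos hd, he, ite_true, Bool.true_eq_false,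
        ite_false]
      by_cases hd2 : d + d + PySem.Int.mod ((a.length : Int) - d) d0 ≤ (a.length : Int)
      · have he2 : 2 * (d + d + PySem.Int.mod ((a.length : Int) - d) d0)
            = (d + d + PySem.Int.mod ((a.length : Int) - d) d0)
              + (d + d + PySem.Int.mod ((a.length : Int) - d) d0) := by ring
        simp only [if_pos hd2, he2]
        rw [ih]
        simp [List.append_assoc]
      · simp [if_neg hd2]
    · simp [crucesLoop, crucesChild, if_neg hd]

-- ===== VERDICT =====
theorem cruces_spec : Claim_equal_cruces := by
  intro padreA padreB cantPuntos _ _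
  show _ = _
  simp only [cruces, cruces_alt]
  rw [crucesLoop_eq_child]
  simp
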